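-- pv_equiv track=rewrite | github.com/WillemKauf/AdventOfCode | 2022/18.py | part2
-- ===== SOURCE A (Python) =====
-- from collections import deque
--
-- def part2(input_arr):
--     min_x  = min([xyz[0]-1 for xyz in input_arr])
--     max_x  = max([xyz[0]+1 for xyz in input_arr])
--     min_y  = min([xyz[1]-1 for xyz in input_arr])
--     max_y  = max([xyz[1]+1 for xyz in input_arr])
--     min_z  = min([xyz[2]-1 for xyz in input_arr])
--     max_z  = max([xyz[2]+1 for xyz in input_arr])
--     is_valid = lambda n : ((min_x <= n[0] <= max_x) and (min_y <= n[1] <= max_y) and (min_z <= n[2] <= max_z))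
--     seen   = set()
--     res    = 0
--     ddir   = ((1,0,0),(0,1,0),(0,0,1),(-1,0,0),(0,-1,0),(0,0,-1))
--     points = set(input_arr)
--     queue = deque([(min_x, min_y, min_z)])
--     while len(queue):
--         node = queue.popleft()
--         if node in seen:
--             continue
--         seen.add(node)
--         for dd in ddir:
--             neighbour_point = tuple([node[i] + dd[i] for i in range(0,3)])
--             if not is_valid(neighbour_point):
--                 continue
--             if neighbour_point not in points:
--                 queue.append(neighbour_point)
--             else:
--                 res += 1
--     return res
-- ===== SOURCE B (Python) =====
-- def part2(input_arr):
--     # fixpoint sweep: repeatedly scan the whole padded box marking exterior air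
--     # cells until no sweep changes anything, then count cube faces touching them
--     min_x = min(p[0] for p in input_arr) - 1
--     max_x = max(p[0] for p in input_arr) + 1
--     min_y = min(p[1] for p in input_arr) - 1
--     max_y = max(p[1] for p in input_arr) + 1
--     min_z = min(p[2] for p in input_arr) - 1
--     max_z = max(p[2] for p in input_arr) + 1
--     lo = (min_x, min_y, min_z)
--     dirs = ((1,0,0),(0,1,0),(0,0,1),(-1,0,0),(0,-1,0),(0,0,-1))
--     solid = set(input_arr)
--     cells = [(x, y, z)
--              for x in range(min_x, max_x + 1)
--              for y in range(min_y, max_y + 1)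
--              for z in range(min_z, max_z + 1)]
--     marked = set()
--     changed = True
--     while changed:
--         changed = False
--         for c in cells:
--             if c in marked or c in solid:
--                 continue
--             if c == lo or any((c[0]+d[0], c[1]+d[1], c[2]+d[2]) in marked for d in dirs):
--                 marked.add(c)
--                 changed = True
--     return sum(1 for p in solid for d in dirs
--                if (p[0]+d[0], p[1]+d[1], p[2]+d[2]) in marked)
-- ===== Notes on version B (the rewrite author's own statement) =====
-- stated objective: alternative
-- what changed: A runs a deque-based BFS flood fill from the corner, counting cube faces inline as it pops cells; B has no queue at all: it builds the list of all padded-box cells and repeatedly sweeps the whole grid (Gauss-Seidel-style fixpoint iteration), marking an air cell when it is the corner or adjacent to a marked cell, until a sweep changes nothing, then counts cube faces adjacent to the marked set in a separate pass.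
import Mathlib
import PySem

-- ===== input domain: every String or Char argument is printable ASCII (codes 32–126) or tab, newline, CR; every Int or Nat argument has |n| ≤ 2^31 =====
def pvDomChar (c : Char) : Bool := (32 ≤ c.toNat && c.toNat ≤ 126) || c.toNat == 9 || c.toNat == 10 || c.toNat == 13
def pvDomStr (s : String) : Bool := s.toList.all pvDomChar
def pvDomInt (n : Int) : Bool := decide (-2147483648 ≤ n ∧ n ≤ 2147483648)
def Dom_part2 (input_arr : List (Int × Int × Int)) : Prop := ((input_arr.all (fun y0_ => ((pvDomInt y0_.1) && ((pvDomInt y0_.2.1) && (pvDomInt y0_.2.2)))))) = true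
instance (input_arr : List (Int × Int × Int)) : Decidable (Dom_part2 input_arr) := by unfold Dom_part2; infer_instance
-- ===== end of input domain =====

-- B replaces A's deque BFS flood fill (which counts faces inline) by a queue-free fixpoint
-- iteration: repeated full sweeps over the padded-box cell list marking exterior air until a
-- sweep changes nothing, then a separate counting pass over the cubes; same return value,
-- no speed claim.
-- In both ports the 'seen'/'marked' Python hash set is modelled as a Std.HashSet (membership
-- and insertion only, like the Python set) and 'points'/'solid' as a PySem.Set; the Lean
-- loops carry a fuel argument that provably exceeds the number of iterations the Python
-- loops perform, so the ports compute exactly what the Pythons compute.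

-- ===== PORT A =====
-- geometry helpers shared verbatim by both Pythons (tuple addition, the six offsets, bounds test)
def pvAdd (a b : Int × Int × Int) : Int × Int × Int :=
  (a.1 + b.1, a.2.1 + b.2.1, a.2.2 + b.2.2)

def pvDirs : List (Int × Int × Int) :=
  [(1,0,0), (0,1,0), (0,0,1), (-1,0,0), (0,-1,0), (0,0,-1)]

def pvInBox (mn mx n : Int × Int × Int) : Bool :=
  ((mn.1 ≤ n.1 && n.1 ≤ mx.1) && (mn.2.1 ≤ n.2.1 && n.2.1 ≤ mx.2.1)) &&
  (mn.2.2 ≤ n.2.2 && n.2.2 ≤ mx.2.2)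

-- all cells of the padded box, x-major (B's Python comprehension; A's port only uses its length)
def pvCells (mn mx : Int × Int × Int) : List (Int × Int × Int) :=
  (PySem.List.pyRange mn.1 (mx.1 + 1) 1).flatMap (fun x =>
    (PySem.List.pyRange mn.2.1 (mx.2.1 + 1) 1).flatMap (fun y =>
      (PySem.List.pyRange mn.2.2 (mx.2.2 + 1) 1).map (fun z => (x, y, z))))

-- fuel for A's while-loop: 14·(box volume)+2 strictly dominates the measure
-- 14·(unseen box cells) + |front| + 2·|back|, which decreases every iteration
def pvFuel (mn mx : Int × Int × Int) : Nat := 14 * (pvCells mn mx).length + 2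

-- A's while loop: popleft, skip if seen, else mark seen and per direction either count a face
-- (neighbour is a cube) or append the valid air neighbour to the deque
def part2Loop (points : PySem.Set (Int × Int × Int)) (mn mx : Int × Int × Int) :
    Nat → List (Int × Int × Int) → List (Int × Int × Int) →
    Std.HashSet (Int × Int × Int) → Int → Int
  | 0, _, _, _, res => res
  | f + 1, [], back, seen, res =>
    match back with
    | [] => res
    | _ :: _ => part2Loop points mn mx f back.reverse [] seen res
  | f + 1, node :: front, back, seen, res =>
    if seen.contains node then part2Loop points mn mx f front back seen res
    else
      let st := pvDirs.foldl (fun (st : List (Int × Int × Int) × Int) dd =>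
        let nb := pvAdd node dd
        if !(pvInBox mn mx nb) then st
        else if PySem.Set.contains points nb then (st.1, st.2 + 1)
        else (nb :: st.1, st.2)) (back, res)
      part2Loop points mn mx f front st.1 (seen.insert node) st.2

def part2 (input_arr : List (Int × Int × Int)) : Int :=
  -- min()/max() of an empty list raise ValueError in Python: the [] input is excluded by Pre_
  let min_x := (PySem.List.min? (input_arr.map (fun p => p.1 - 1)) (fun x => x)).getD 0
  let max_x := (PySem.List.max? (input_arr.map (fun p => p.1 + 1)) (fun x => x)).getD 0
  let min_y := (PySem.List.min? (input_arr.map (fun p => p.2.1 - 1)) (fun x => x)).getD 0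
  let max_y := (PySem.List.max? (input_arr.map (fun p => p.2.1 + 1)) (fun x => x)).getD 0
  let min_z := (PySem.List.min? (input_arr.map (fun p => p.2.2 - 1)) (fun x => x)).getD 0
  let max_z := (PySem.List.max? (input_arr.map (fun p => p.2.2 + 1)) (fun x => x)).getD 0
  let mn := (min_x, min_y, min_z)
  let mx := (max_x, max_y, max_z)
  let points := PySem.Set.ofList input_arr
  part2Loop points mn mx (pvFuel mn mx) [mn] [] ∅ 0

-- ===== PORT B =====
-- B's marking condition for an air cell: it is the corner or has a marked neighbour
def pvMarkCond (m : Std.HashSet (Int × Int × Int)) (lo c : Int × Int × Int) : Bool :=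
  c == lo || pvDirs.any (fun d => m.contains (pvAdd c d))

-- one cell of a sweep: skip marked/solid cells, mark when the condition holds (and set changed)
def pvRoundStep (solid : PySem.Set (Int × Int × Int)) (lo : Int × Int × Int)
    (st : Std.HashSet (Int × Int × Int) × Bool) (c : Int × Int × Int) :
    Std.HashSet (Int × Int × Int) × Bool :=
  if st.1.contains c || PySem.Set.contains solid c then st
  else if pvMarkCond st.1 lo c then (st.1.insert c, true)
  else st

-- one full sweep over the cell list ('for c in cells: …' with the changed flag)
def pvRound (solid : PySem.Set (Int × Int × Int)) (lo : Int × Int × Int)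
    (cells : List (Int × Int × Int)) (m : Std.HashSet (Int × Int × Int)) :
    Std.HashSet (Int × Int × Int) × Bool :=
  cells.foldl (pvRoundStep solid lo) (m, false)

-- 'while changed:' — fuel (box volume)+1 strictly dominates the number of changing sweeps,
-- since each changing sweep marks at least one new box cell
def pvSweep (solid : PySem.Set (Int × Int × Int)) (lo : Int × Int × Int)
    (cells : List (Int × Int × Int)) :
    Nat → Std.HashSet (Int × Int × Int) → Std.HashSet (Int × Int × Int)
  | 0, m => m
  | g + 1, m =>
    let r := pvRound solid lo cells m
    if r.2 then pvSweep solid lo cells g r.1 else r.1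

def part2_alt (input_arr : List (Int × Int × Int)) : Int :=
  -- min()/max() of an empty sequence raise ValueError in Python: [] is excluded by Pre_
  let lo := (((PySem.List.min? (input_arr.map (fun p => p.1)) (fun x => x)).getD 0) - 1,
             ((PySem.List.min? (input_arr.map (fun p => p.2.1)) (fun x => x)).getD 0) - 1,
             ((PySem.List.min? (input_arr.map (fun p => p.2.2)) (fun x => x)).getD 0) - 1)
  let hi := (((PySem.List.max? (input_arr.map (fun p => p.1)) (fun x => x)).getD 0) + 1,
             ((PySem.List.max? (input_arr.map (fun p => p.2.1)) (fun x => x)).getD 0) + 1,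
             ((PySem.List.max? (input_arr.map (fun p => p.2.2)) (fun x => x)).getD 0) + 1)
  let solid := PySem.Set.ofList input_arr
  let cells := pvCells lo hi
  -- fixpoint sweeps until nothing changes
  let marked := pvSweep solid lo cells (cells.length + 1) ∅
  -- counting pass: for each cube, count its six neighbours lying in the marked set (a sum over
  -- the set 'solid' whose value does not depend on the set's iteration order)
  (((solid.map (fun p =>
      (pvDirs.filter (fun d => marked.contains (pvAdd p d))).length)).sum : Nat) : Int)

-- ===== PRECONDITION & SPEC =====
-- Pre_ excludes only the empty list, on which Python's min() raises ValueError (in A and in B).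
def Pre_part2 (input_arr : List (Int × Int × Int)) : Prop := input_arr ≠ []
instance (input_arr : List (Int × Int × Int)) : Decidable (Pre_part2 input_arr) := by
  unfold Pre_part2; infer_instance

def pvWitness_part2 : (List (Int × Int × Int)) := [(0, 0, 0), (1, 0, 0)]

def Spec_part2 (input_arr : List (Int × Int × Int)) (out : Int) : Prop := out = part2_alt input_arr
instance (input_arr : List (Int × Int × Int)) (out : Int) : Decidable (Spec_part2 input_arr out) := by unfold Spec_part2; infer_instance

-- ===== CLAIM (what is proved, stated in full; the proofs are below) =====
def Claim_equal_part2 : Prop := ∀ (input_arr : List (Int × Int × Int)), Dom_part2 input_arr → Pre_part2 input_arr → Spec_part2 input_arr (part2 input_arr)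

-- ===== LEMMAS AND PROOFS =====

-- proof-side helpers
def pvSub (a b : Int × Int × Int) : Int × Int × Int :=
  (a.1 - b.1, a.2.1 - b.2.1, a.2.2 - b.2.2)

-- faces of exterior cell c that touch a cube (valid neighbour in points)
def pvDeg (points : PySem.Set (Int × Int × Int)) (mn mx c : Int × Int × Int) : Nat :=
  ((pvDirs.map (pvAdd c)).filter
      (fun nb => pvInBox mn mx nb && PySem.Set.contains points nb)).length

-- B's counting pass against an arbitrary marked set
def pvCnt (P : List (Int × Int × Int)) (s : Std.HashSet (Int × Int × Int)) : Nat :=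
  (P.map (fun p => (pvDirs.filter (fun d => s.contains (pvAdd p d))).length)).sum

-- proof-side mirror of A's BFS that only accumulates the seen set (same pops/pushes as
-- part2Loop, no counting); A's count is recovered from its final value by part2_lockstep
def part2Fill (points : PySem.Set (Int × Int × Int)) (mn mx : Int × Int × Int) :
    Nat → List (Int × Int × Int) → List (Int × Int × Int) →
    Std.HashSet (Int × Int × Int) → Std.HashSet (Int × Int × Int)
  | 0, _, _, ext => ext
  | f + 1, [], back, ext =>
    match back with
    | [] => ext
    | _ :: _ => part2Fill points mn mx f back.reverse [] ext
  | f + 1, node :: front, back, ext =>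
    if ext.contains node then part2Fill points mn mx f front back ext
    else
      part2Fill points mn mx f front
        (pvDirs.foldl (fun acc dd =>
          let nb := pvAdd node dd
          if pvInBox mn mx nb && !PySem.Set.contains points nb then nb :: acc else acc) back)
        (ext.insert node)

-- one step of exterior reachability: y is an in-box air cell adjacent to x
def pvStep (points : PySem.Set (Int × Int × Int)) (mn mx x y : Int × Int × Int) : Prop :=
  pvInBox mn mx y = true ∧ PySem.Set.contains points y = false ∧ ∃ d ∈ pvDirs, y = pvAdd x d

-- exterior cells: reachable from the corner mn through in-box air
def pvReach (points : PySem.Set (Int × Int × Int)) (mn mx c : Int × Int × Int) : Prop :=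
  Relation.ReflTransGen (pvStep points mn mx) mn c

-- number of box cells not yet in s (the termination measure's main component)
def pvU (s : Std.HashSet (Int × Int × Int)) (cells : List (Int × Int × Int)) : Nat :=
  cells.countP (fun c => !s.contains c)

-- the BFS measure
def pvMu (cells : List (Int × Int × Int)) (s : Std.HashSet (Int × Int × Int))
    (front back : List (Int × Int × Int)) : Nat :=
  14 * pvU s cells + front.length + 2 * back.length

theorem pvCnt_empty (P : List (Int × Int × Int)) : pvCnt P ∅ = 0 := by
  unfold pvCnt
  apply List.sum_eq_zero
  intro x hx
  obtain ⟨p, hp, rfl⟩ := List.mem_map.mp hx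
  simp

theorem pvCnt_congr (P : List (Int × Int × Int)) (s s' : Std.HashSet (Int × Int × Int))
    (h : ∀ x, s.contains x = s'.contains x) : pvCnt P s = pvCnt P s' := by
  unfold pvCnt
  refine congrArg List.sum (List.map_congr_left (fun p _ => ?_))
  refine congrArg List.length (List.filter_congr (fun d _ => ?_))
  rw [h]

-- A's inner for-loop over the six directions, characterised: it pushes the valid air
-- neighbours (in reverse, as the back half of the deque) and adds the cube-face count
theorem part2_inner (points : PySem.Set (Int × Int × Int)) (mn mx node : Int × Int × Int) :
    ∀ (ds : List (Int × Int × Int)) (q : List (Int × Int × Int)) (r : Int),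
    ds.foldl (fun (st : List (Int × Int × Int) × Int) dd =>
        let nb := pvAdd node dd
        if !(pvInBox mn mx nb) then st
        else if PySem.Set.contains points nb then (st.1, st.2 + 1)
        else (nb :: st.1, st.2)) (q, r) =
      (((ds.map (pvAdd node)).filter
          (fun nb => pvInBox mn mx nb && !PySem.Set.contains points nb)).reverse ++ q,
       r + (((ds.map (pvAdd node)).filter
          (fun nb => pvInBox mn mx nb && PySem.Set.contains points nb)).length : Int)) := by
  intro ds
  induction ds with
  | nil => intro q r; simp
  | cons d t ih =>
    intro q r
    rw [List.foldl_cons]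
    by_cases hv : pvInBox mn mx (pvAdd node d) = true
    · by_cases hp : PySem.Set.contains points (pvAdd node d) = true
      · rw [show (let nb := pvAdd node d;
            if (!pvInBox mn mx nb) = true then (q, r)
            else if PySem.Set.contains points nb = true then ((q, r).1, (q, r).2 + 1)
            else (nb :: (q, r).1, (q, r).2)) = (q, r + 1) from by
              simp only [hv, hp, Bool.not_true, Bool.false_eq_true, if_false, if_true], ih]
        simp only [List.map_cons, List.filter_cons, hv, hp, Bool.not_true, Bool.and_false,
          Bool.and_true, Bool.false_eq_true, if_false, if_true, List.length_cons, Prod.mk.injEq]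
        constructor
        · trivial
        · push_cast; ring
      · rw [show (let nb := pvAdd node d;
            if (!pvInBox mn mx nb) = true then (q, r)
            else if PySem.Set.contains points nb = true then ((q, r).1, (q, r).2 + 1)
            else (nb :: (q, r).1, (q, r).2)) = (pvAdd node d :: q, r) from by
              simp only [hv, hp, Bool.not_true, Bool.false_eq_true, if_false], ih]
        rw [Bool.not_eq_true] at hp
        simp only [List.map_cons, List.filter_cons, hv, hp, Bool.not_false, Bool.and_false,
          Bool.and_true, Bool.false_eq_true, if_false, if_true, List.reverse_cons,
          List.append_assoc, List.singleton_append]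
    · rw [show (let nb := pvAdd node d;
          if (!pvInBox mn mx nb) = true then (q, r)
          else if PySem.Set.contains points nb = true then ((q, r).1, (q, r).2 + 1)
          else (nb :: (q, r).1, (q, r).2)) = (q, r) from by
            rw [Bool.not_eq_true] at hv
            simp only [hv, Bool.not_false, if_true], ih]
      rw [Bool.not_eq_true] at hv
      simp only [List.map_cons, List.filter_cons, hv, Bool.false_and, Bool.false_eq_true,
        if_false]

-- the fill's inner for-loop (no counting), characterised the same way
theorem part2Fill_inner (points : PySem.Set (Int × Int × Int)) (mn mx node : Int × Int × Int) :
    ∀ (ds : List (Int × Int × Int)) (q : List (Int × Int × Int)),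
    ds.foldl (fun acc dd =>
        let nb := pvAdd node dd
        if pvInBox mn mx nb && !PySem.Set.contains points nb then nb :: acc else acc) q =
      ((ds.map (pvAdd node)).filter
          (fun nb => pvInBox mn mx nb && !PySem.Set.contains points nb)).reverse ++ q := by
  intro ds
  induction ds with
  | nil => intro q; simp
  | cons d t ih =>
    intro q
    rw [List.foldl_cons]
    by_cases hk : (pvInBox mn mx (pvAdd node d) && !PySem.Set.contains points (pvAdd node d)) = true
    · rw [show (let nb := pvAdd node d;
          if (pvInBox mn mx nb && !PySem.Set.contains points nb) = true
          then nb :: q else q) = (pvAdd node d :: q) from by simp only [hk, if_true], ih]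
      simp only [List.map_cons, List.filter_cons, hk, if_true, List.reverse_cons,
        List.append_assoc, List.singleton_append]
    · rw [Bool.not_eq_true] at hk
      rw [show (let nb := pvAdd node d;
          if (pvInBox mn mx nb && !PySem.Set.contains points nb) = true
          then nb :: q else q) = q from by simp only [hk, Bool.false_eq_true, if_false], ih]
      simp only [List.map_cons, List.filter_cons, hk, Bool.false_eq_true, if_false]

-- length of a filter as a 0/1 sum, and a Fubini swap for list double sums
theorem pv_length_filter (l : List (Int × Int × Int)) (p : (Int × Int × Int) → Bool) :
    (l.filter p).length = (l.map (fun x => if p x then 1 else 0)).sum := by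
  induction l with
  | nil => simp
  | cons a t ih =>
    rw [List.filter_cons, List.map_cons, List.sum_cons, ← ih]
    by_cases h : p a = true
    · simp only [h, if_true, List.length_cons]
      omega
    · rw [Bool.not_eq_true] at h
      simp [h]

theorem pv_sum_swap (A : List (Int × Int × Int)) (B : List (Int × Int × Int))
    (f : (Int × Int × Int) → (Int × Int × Int) → Nat) :
    (A.map (fun a => (B.map (f a)).sum)).sum = (B.map (fun b => (A.map (fun a => f a b)).sum)).sum := by
  induction A with
  | nil => simp
  | cons a A ih =>
    simp only [List.map_cons, List.sum_cons, ih, ← List.sum_map_add]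

-- a disjoint 'or' splits a countP
theorem pv_countP_or (l : List (Int × Int × Int)) (a b : (Int × Int × Int) → Bool)
    (h : ∀ x ∈ l, a x = true → b x = false) :
    l.countP (fun x => a x || b x) = l.countP a + l.countP b := by
  induction l with
  | nil => simp
  | cons x t ih =>
    have iht := ih (fun y hy => h y (List.mem_cons_of_mem _ hy))
    by_cases ha : a x = true
    · have hb := h x List.mem_cons_self ha
      simp [ha, hb, iht]
      omega
    · rw [Bool.not_eq_true] at ha
      by_cases hb : b x = true
      · simp [ha, hb, iht]
        omega
      · rw [Bool.not_eq_true] at hb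
        simp [ha, hb, iht]

theorem pv_deg_eq (P : PySem.Set (Int × Int × Int)) (mn mx node : Int × Int × Int)
    (hP : P.Nodup) (hbox : ∀ p ∈ P, pvInBox mn mx p = true) :
    (P.map (fun p => (pvDirs.filter (fun d => node == pvAdd p d)).length)).sum =
      pvDeg P mn mx node := by
  calc (P.map (fun p => (pvDirs.filter (fun d => node == pvAdd p d)).length)).sum
      = (P.map (fun p => (pvDirs.map (fun d => if (node == pvAdd p d) = true
          then 1 else 0)).sum)).sum := by
        exact congrArg List.sum (List.map_congr_left (fun p _ => pv_length_filter _ _))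
    _ = (pvDirs.map (fun d => (P.map (fun p => if (node == pvAdd p d) = true
          then 1 else 0)).sum)).sum := pv_sum_swap _ _ _
    _ = (pvDirs.map (fun d => if PySem.Set.contains P (pvSub node d) then 1 else 0)).sum := by
        refine congrArg List.sum (List.map_congr_left (fun d _ => ?_))
        rw [← pv_length_filter]
        rw [show (List.filter (fun p => node == pvAdd p d) P).length =
            List.countP (fun p => p == pvSub node d) P from by
          rw [← List.countP_eq_length_filter]
          refine List.countP_congr (fun p _ => ?_)
          obtain ⟨p1, p2, p3⟩ := p; obtain ⟨d1, d2, d3⟩ := d; obtain ⟨n1, n2, n3⟩ := node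
          simp only [pvAdd, pvSub, beq_iff_eq, Prod.ext_iff]
          constructor <;> (intro hh; refine ⟨by omega, by omega, by omega⟩)]
        rw [← List.count]
        by_cases hmem : pvSub node d ∈ P
        · rw [List.count_eq_one_of_mem hP hmem, (PySem.Set.contains_iff _ _).mpr hmem, if_pos rfl]
        · rw [List.count_eq_zero_of_not_mem hmem]
          have : PySem.Set.contains P (pvSub node d) = false := by
            rw [← Bool.not_eq_true, PySem.Set.contains_iff]; exact hmem
          rw [this]
          simp
    _ = (pvDirs.map (fun d => if PySem.Set.contains P (pvAdd node d) then 1 else 0)).sum := by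
        obtain ⟨n1, n2, n3⟩ := node
        simp only [pvDirs, List.map_cons, List.map_nil, List.sum_cons, List.sum_nil,
          pvAdd, pvSub, sub_zero, add_zero, sub_neg_eq_add, ← sub_eq_add_neg]
        ring
    _ = (pvDirs.filter (fun d => PySem.Set.contains P (pvAdd node d))).length := by
        rw [pv_length_filter]
    _ = pvDeg P mn mx node := by
        unfold pvDeg
        rw [← List.countP_eq_length_filter, ← List.countP_eq_length_filter, List.countP_map]
        refine List.countP_congr (fun d _ => ?_)
        show PySem.Set.contains P (pvAdd node d) = true ↔
          (pvInBox mn mx (pvAdd node d) && PySem.Set.contains P (pvAdd node d)) = true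
        by_cases hcc : PySem.Set.contains P (pvAdd node d) = true
        · rw [hcc, hbox _ ((PySem.Set.contains_iff _ _).mp hcc)]
          simp
        · rw [Bool.not_eq_true] at hcc
          rw [hcc]
          simp

-- inserting a fresh air cell into the seen set raises the counting pass by exactly the
-- number of faces A counts when it processes that cell (the (p,d) ↔ (p+d,−d) flip, per step)
theorem pvCnt_insert (P : PySem.Set (Int × Int × Int)) (mn mx node : Int × Int × Int)
    (s : Std.HashSet (Int × Int × Int)) (hP : P.Nodup)
    (hbox : ∀ p ∈ P, pvInBox mn mx p = true) (hs : s.contains node = false) :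
    pvCnt P (s.insert node) = pvCnt P s + pvDeg P mn mx node := by
  unfold pvCnt
  have hper : ∀ p, (pvDirs.filter (fun d => (s.insert node).contains (pvAdd p d))).length =
      (pvDirs.filter (fun d => s.contains (pvAdd p d))).length +
      (pvDirs.filter (fun d => node == pvAdd p d)).length := by
    intro p
    simp only [← List.countP_eq_length_filter]
    rw [List.countP_congr (fun d _ => by rw [Std.HashSet.contains_insert])]
    rw [pv_countP_or _ _ _ (fun d _ hd => by
      rw [← eq_of_beq hd]
      exact hs)]
    omega
  calc (P.map (fun p => (pvDirs.filter (fun d => (s.insert node).contains (pvAdd p d))).length)).sum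
      = (P.map (fun p => (pvDirs.filter (fun d => s.contains (pvAdd p d))).length +
          (pvDirs.filter (fun d => node == pvAdd p d)).length)).sum := by
        exact congrArg List.sum (List.map_congr_left (fun p _ => hper p))
    _ = (P.map (fun p => (pvDirs.filter (fun d => s.contains (pvAdd p d))).length)).sum +
          (P.map (fun p => (pvDirs.filter (fun d => node == pvAdd p d)).length)).sum := by
        rw [← List.sum_map_add]
    _ = (P.map (fun p => (pvDirs.filter (fun d => s.contains (pvAdd p d))).length)).sum +
          pvDeg P mn mx node := by
        rw [pv_deg_eq P mn mx node hP hbox]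

-- lockstep: A's loop returns its accumulator plus the growth of the counting pass as the fill
-- extends the seen set
theorem part2_lockstep (points : PySem.Set (Int × Int × Int)) (mn mx : Int × Int × Int)
    (hP : points.Nodup) (hbox : ∀ p ∈ points, pvInBox mn mx p = true) :
    ∀ (f : Nat) (front back : List (Int × Int × Int)) (s : Std.HashSet (Int × Int × Int)) (r : Int),
    part2Loop points mn mx f front back s r =
      r + (pvCnt points (part2Fill points mn mx f front back s) : Int) - (pvCnt points s : Int) := by
  intro f
  induction f with
  | zero => intro front back s r; rw [part2Loop, part2Fill]; ring
  | succ f ih =>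
    intro front back s r
    cases front with
    | nil =>
      cases back with
      | nil => rw [part2Loop, part2Fill]; ring
      | cons b bt => rw [part2Loop, part2Fill]; exact ih _ _ _ _
    | cons node front =>
      rw [part2Loop, part2Fill]
      by_cases hc : s.contains node = true
      · simp only [hc, if_true]
        exact ih _ _ _ _
      · rw [Bool.not_eq_true] at hc
        simp only [hc, Bool.false_eq_true, if_false]
        rw [part2_inner, part2Fill_inner, ih]
        rw [pvCnt_insert points mn mx node s hP hbox hc]
        unfold pvDeg
        push_cast
        ring

-- min/max of a shifted list (B computes min/max first and shifts afterwards)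
theorem pv_min_foldl (t : List Int) : ∀ a : Int,
    (t.map (fun x => x - 1)).foldl min (a - 1) = t.foldl min a - 1 := by
  induction t with
  | nil => intro a; simp
  | cons b t ih =>
    intro a
    simp only [List.map_cons, List.foldl_cons]
    rw [show min (a - 1) (b - 1) = min a b - 1 by omega, ih]

theorem pv_min_shift (l : List Int) :
    PySem.List.min? (l.map (fun x => x - 1)) (fun x => x) =
      (PySem.List.min? l (fun x => x)).map (fun x => x - 1) := by
  cases l with
  | nil => simp [PySem.List.min?]
  | cons a t =>
    simp only [List.map_cons, PySem.List.min?_id_cons, Option.map_some]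
    rw [pv_min_foldl]

theorem pv_max_foldl (t : List Int) : ∀ a : Int,
    (t.map (fun x => x + 1)).foldl max (a + 1) = t.foldl max a + 1 := by
  induction t with
  | nil => intro a; simp
  | cons b t ih =>
    intro a
    simp only [List.map_cons, List.foldl_cons]
    rw [show max (a + 1) (b + 1) = max a b + 1 by omega, ih]

theorem pv_max_shift (l : List Int) :
    PySem.List.max? (l.map (fun x => x + 1)) (fun x => x) =
      (PySem.List.max? l (fun x => x)).map (fun x => x + 1) := by
  cases l with
  | nil => simp [PySem.List.max?]
  | cons a t =>
    simp only [List.map_cons, PySem.List.max?_id_cons, Option.map_some]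
    rw [pv_max_foldl]

theorem pv_bound_min (l : List (Int × Int × Int)) (h : l ≠ []) (π : (Int × Int × Int) → Int) :
    (PySem.List.min? (l.map (fun p => π p - 1)) (fun x => x)).getD 0 =
      (PySem.List.min? (l.map π) (fun x => x)).getD 0 - 1 := by
  have hmm : l.map (fun p => π p - 1) = (l.map π).map (fun x => x - 1) := by
    rw [List.map_map]; rfl
  rw [hmm, pv_min_shift]
  cases hm : PySem.List.min? (l.map π) (fun x => x) with
  | none => exact absurd (by simpa using (PySem.List.min?_eq_none_iff (l.map π) _).mp hm) h
  | some m => simp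

theorem pv_bound_max (l : List (Int × Int × Int)) (h : l ≠ []) (π : (Int × Int × Int) → Int) :
    (PySem.List.max? (l.map (fun p => π p + 1)) (fun x => x)).getD 0 =
      (PySem.List.max? (l.map π) (fun x => x)).getD 0 + 1 := by
  have hmm : l.map (fun p => π p + 1) = (l.map π).map (fun x => x + 1) := by
    rw [List.map_map]; rfl
  rw [hmm, pv_max_shift]
  cases hm : PySem.List.max? (l.map π) (fun x => x) with
  | none => exact absurd (by simpa using (PySem.List.max?_eq_none_iff (l.map π) _).mp hm) h
  | some m => simp

-- box membership ↔ membership in the cell list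
theorem pv_mem_cells (mn mx c : Int × Int × Int) :
    c ∈ pvCells mn mx ↔ pvInBox mn mx c = true := by
  obtain ⟨c1, c2, c3⟩ := c
  simp only [pvCells, List.mem_flatMap, List.mem_map, PySem.List.mem_pyRange_one, pvInBox,
    Bool.and_eq_true, decide_eq_true_eq]
  constructor
  · rintro ⟨x, hx, y, hy, z, hz, h⟩
    obtain ⟨rfl, rfl, rfl⟩ := Prod.mk.injEq .. ▸ (by
      injection h with h1 h2
      injection h2 with h2 h3
      exact ⟨h1.symm, h2.symm, h3.symm⟩ : c1 = x ∧ c2 = y ∧ c3 = z)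
    exact ⟨⟨⟨by omega, by omega⟩, by omega, by omega⟩, by omega, by omega⟩
  · rintro ⟨⟨⟨h1, h2⟩, h3, h4⟩, h5, h6⟩
    exact ⟨c1, ⟨h1, by omega⟩, c2, ⟨h3, by omega⟩, c3, ⟨h5, by omega⟩, rfl⟩

-- the six offsets are closed under negation
theorem pv_dirs_neg (d : Int × Int × Int) (hd : d ∈ pvDirs) :
    ∃ d' ∈ pvDirs, ∀ c : Int × Int × Int, pvAdd (pvAdd c d) d' = c := by
  simp only [pvDirs, List.mem_cons, List.not_mem_nil, or_false] at hd
  rcases hd with rfl | rfl | rfl | rfl | rfl | rfl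
  · exact ⟨(-1,0,0), by simp [pvDirs], fun c => by obtain ⟨a,b,g⟩ := c; simp [pvAdd]⟩
  · exact ⟨(0,-1,0), by simp [pvDirs], fun c => by obtain ⟨a,b,g⟩ := c; simp [pvAdd]⟩
  · exact ⟨(0,0,-1), by simp [pvDirs], fun c => by obtain ⟨a,b,g⟩ := c; simp [pvAdd]⟩
  · exact ⟨(1,0,0), by simp [pvDirs], fun c => by obtain ⟨a,b,g⟩ := c; simp [pvAdd]⟩
  · exact ⟨(0,1,0), by simp [pvDirs], fun c => by obtain ⟨a,b,g⟩ := c; simp [pvAdd]⟩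
  · exact ⟨(0,0,1), by simp [pvDirs], fun c => by obtain ⟨a,b,g⟩ := c; simp [pvAdd]⟩

-- strict countP drop at a witness
theorem pv_countP_lt (l : List (Int × Int × Int)) (p q : (Int × Int × Int) → Bool)
    (hpq : ∀ x ∈ l, q x = true → p x = true) (c : Int × Int × Int) (hc : c ∈ l)
    (hq : q c = false) (hp : p c = true) : l.countP q < l.countP p := by
  induction l with
  | nil => cases hc
  | cons a t ih =>
    have hle : t.countP q ≤ t.countP p :=
      List.countP_mono_left (fun x hx => hpq x (List.mem_cons_of_mem _ hx))
    rw [List.countP_cons, List.countP_cons]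
    rcases List.mem_cons.mp hc with rfl | hct
    · simp only [hq, hp, Bool.false_eq_true, if_false, if_true]
      omega
    · have hlt := ih (fun x hx => hpq x (List.mem_cons_of_mem _ hx)) hct
      by_cases ha : q a = true
      · simp only [ha, hpq a List.mem_cons_self ha, if_true]
        omega
      · rw [Bool.not_eq_true] at ha
        simp only [ha, Bool.false_eq_true, if_false]
        have : (if p a = true then 1 else 0) ≥ 0 := by positivity
        omega

theorem pvU_insert_lt (cells : List (Int × Int × Int)) (s : Std.HashSet (Int × Int × Int))
    (c : Int × Int × Int) (hc : c ∈ cells) (hs : s.contains c = false) :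
    pvU (s.insert c) cells < pvU s cells := by
  refine pv_countP_lt cells (fun x => !s.contains x) (fun x => !(s.insert c).contains x)
    (fun x _ hx => ?_) c hc (by simp) (by simp [hs])
  rw [Bool.not_eq_true', Std.HashSet.contains_insert] at hx
  simp only [Bool.or_eq_false_iff] at hx
  simp [hx.2]

theorem pvU_mono (cells : List (Int × Int × Int)) (s s' : Std.HashSet (Int × Int × Int))
    (h : ∀ x, s.contains x = true → s'.contains x = true) : pvU s' cells ≤ pvU s cells := by
  refine List.countP_mono_left (fun x _ hx => ?_)
  simp only [Bool.not_eq_true'] at hx ⊢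
  cases hsx : s.contains x with
  | false => rfl
  | true => rw [h x hsx] at hx; cases hx

-- ===== A-side: the fill computes exactly the reachable set =====

theorem fill_mono (points : PySem.Set (Int × Int × Int)) (mn mx : Int × Int × Int) :
    ∀ (f : Nat) (front back : List (Int × Int × Int)) (s : Std.HashSet (Int × Int × Int))
      (x : Int × Int × Int), s.contains x = true →
      (part2Fill points mn mx f front back s).contains x = true := by
  intro f
  induction f with
  | zero => intro front back s x hx; rw [part2Fill]; exact hx
  | succ f ih =>
    intro front back s x hx
    cases front with
    | nil =>
      cases back with
      | nil => rw [part2Fill]; exact hx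
      | cons b bt => rw [part2Fill]; exact ih _ _ _ _ hx
    | cons node front =>
      rw [part2Fill]
      by_cases hc : s.contains node = true
      · simp only [hc, if_true]; exact ih _ _ _ _ hx
      · rw [Bool.not_eq_true] at hc
        simp only [hc, Bool.false_eq_true, if_false]
        exact ih _ _ _ _ (by simp [Std.HashSet.contains_insert, hx])

theorem fill_sound (points : PySem.Set (Int × Int × Int)) (mn mx : Int × Int × Int) :
    ∀ (f : Nat) (front back : List (Int × Int × Int)) (s : Std.HashSet (Int × Int × Int)),
      (∀ x, s.contains x = true → pvReach points mn mx x) →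
      (∀ c ∈ front ++ back, pvReach points mn mx c) →
      ∀ x, (part2Fill points mn mx f front back s).contains x = true →
        pvReach points mn mx x := by
  intro f
  induction f with
  | zero => intro front back s hs _ x hx; rw [part2Fill] at hx; exact hs x hx
  | succ f ih =>
    intro front back s hs hq x hx
    cases front with
    | nil =>
      cases back with
      | nil => rw [part2Fill] at hx; exact hs x hx
      | cons b bt =>
        rw [part2Fill] at hx
        refine ih _ _ _ hs (fun c hc => hq c ?_) x hx
        simp only [List.nil_append, List.append_nil, List.mem_reverse] at hc ⊢
        exact hc
    | cons node front =>
      rw [part2Fill] at hx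
      by_cases hc : s.contains node = true
      · simp only [hc, if_true] at hx
        exact ih _ _ _ hs (fun c hcm => hq c (by
          rcases List.mem_append.mp hcm with h | h
          · exact List.mem_append.mpr (Or.inl (List.mem_cons_of_mem _ h))
          · exact List.mem_append.mpr (Or.inr h))) x hx
      · rw [Bool.not_eq_true] at hc
        simp only [hc, Bool.false_eq_true, if_false] at hx
        rw [part2Fill_inner] at hx
        have hnode : pvReach points mn mx node := hq node (by simp)
        refine ih _ _ _ (fun y hy => ?_) (fun c hcm => ?_) x hx
        · rw [Std.HashSet.contains_insert] at hy
          rcases Bool.or_eq_true_iff.mp hy with h | h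
          · rw [← eq_of_beq h]; exact hnode
          · exact hs y h
        · rcases List.mem_append.mp hcm with h | h
          · exact hq c (List.mem_append.mpr (Or.inl (List.mem_cons_of_mem _ h)))
          · rcases List.mem_append.mp h with h | h
            · rw [List.mem_reverse, List.mem_filter] at h
              obtain ⟨hmem, hcond⟩ := h
              obtain ⟨d, hd, rfl⟩ := List.mem_map.mp hmem
              rcases Bool.and_eq_true_iff.mp hcond with ⟨hbx, hair⟩
              rw [Bool.not_eq_true'] at hair
              exact Relation.ReflTransGen.tail hnode ⟨hbx, hair, d, hd, rfl⟩
            · exact hq c (List.mem_append.mpr (Or.inr h))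

theorem fill_exhaust (points : PySem.Set (Int × Int × Int)) (mn mx : Int × Int × Int) :
    ∀ (f : Nat) (front back : List (Int × Int × Int)) (s : Std.HashSet (Int × Int × Int)),
      pvMu (pvCells mn mx) s front back < f →
      (∀ c ∈ front ++ back, pvInBox mn mx c = true) →
      ∀ c ∈ front ++ back, (part2Fill points mn mx f front back s).contains c = true := by
  intro f
  induction f with
  | zero =>
    intro front back s hmu _ c _
    exact absurd hmu (Nat.not_lt_zero _)
  | succ f ih =>
    intro front back s hmu hbx c hcm
    cases front with
    | nil =>
      cases back with
      | nil => simp at hcm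
      | cons b bt =>
        rw [part2Fill]
        have hmu' : pvMu (pvCells mn mx) s (b :: bt).reverse [] < f := by
          unfold pvMu at hmu ⊢
          simp only [List.length_reverse, List.length_nil, List.length_cons] at *
          omega
        refine ih _ _ _ hmu' (fun e he => hbx e ?_) c ?_
        · simp only [List.append_nil, List.mem_reverse] at he
          simpa using he
        · simp only [List.nil_append] at hcm
          rcases List.mem_cons.mp hcm with rfl | h
          · simp
          · simp [h]
    | cons node front =>
      rw [part2Fill]
      by_cases hc : s.contains node = true
      · simp only [hc, if_true]
        have hmu' : pvMu (pvCells mn mx) s front back < f := by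
          unfold pvMu at hmu ⊢
          simp only [List.length_cons] at hmu
          omega
        have hbx' : ∀ e ∈ front ++ back, pvInBox mn mx e = true := by
          intro e he
          rcases List.mem_append.mp he with h | h
          · exact hbx e (List.mem_append.mpr (Or.inl (List.mem_cons_of_mem _ h)))
          · exact hbx e (List.mem_append.mpr (Or.inr h))
        rcases List.mem_append.mp hcm with hcf | hcb
        · rcases List.mem_cons.mp hcf with rfl | hcf
          · exact fill_mono points mn mx _ _ _ _ _ hc
          · exact ih _ _ _ hmu' hbx' c (List.mem_append.mpr (Or.inl hcf))
        · exact ih _ _ _ hmu' hbx' c (List.mem_append.mpr (Or.inr hcb))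
      · rw [Bool.not_eq_true] at hc
        simp only [hc, Bool.false_eq_true, if_false]
        rw [part2Fill_inner]
        set nbl := (pvDirs.map (pvAdd node)).filter
            (fun nb => pvInBox mn mx nb && !PySem.Set.contains points nb) with hnbl
        have hU : pvU (s.insert node) (pvCells mn mx) < pvU s (pvCells mn mx) :=
          pvU_insert_lt _ _ _ ((pv_mem_cells mn mx node).mpr (hbx node (by simp))) hc
        have hlen : nbl.length ≤ 6 :=
          le_trans (List.length_filter_le _ _) (by simp [pvDirs])
        have hmu' : pvMu (pvCells mn mx) (s.insert node) front (nbl.reverse ++ back) < f := by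
          unfold pvMu at hmu ⊢
          simp only [List.length_append, List.length_reverse, List.length_cons] at *
          omega
        have hbx' : ∀ e ∈ front ++ (nbl.reverse ++ back), pvInBox mn mx e = true := by
          intro e he
          rcases List.mem_append.mp he with h | h
          · exact hbx e (List.mem_append.mpr (Or.inl (List.mem_cons_of_mem _ h)))
          · rcases List.mem_append.mp h with h | h
            · rw [List.mem_reverse, hnbl, List.mem_filter] at h
              exact (Bool.and_eq_true_iff.mp h.2).1
            · exact hbx e (List.mem_append.mpr (Or.inr h))
        rcases List.mem_append.mp hcm with hcf | hcb
        · rcases List.mem_cons.mp hcf with rfl | hcf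
          · exact fill_mono points mn mx _ _ _ _ _ (by simp [Std.HashSet.contains_insert])
          · exact ih _ _ _ hmu' hbx' c (List.mem_append.mpr (Or.inl hcf))
        · exact ih _ _ _ hmu' hbx' c
            (List.mem_append.mpr (Or.inr (List.mem_append.mpr (Or.inr hcb))))

theorem fill_closed (points : PySem.Set (Int × Int × Int)) (mn mx : Int × Int × Int) :
    ∀ (f : Nat) (front back : List (Int × Int × Int)) (s : Std.HashSet (Int × Int × Int)),
      pvMu (pvCells mn mx) s front back < f →
      (∀ c ∈ front ++ back, pvInBox mn mx c = true) →
      (∀ x, s.contains x = true → ∀ y, pvStep points mn mx x y →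
        s.contains y = true ∨ y ∈ front ++ back) →
      ∀ x, (part2Fill points mn mx f front back s).contains x = true →
        ∀ y, pvStep points mn mx x y →
          (part2Fill points mn mx f front back s).contains y = true := by
  intro f
  induction f with
  | zero =>
    intro front back s hmu _ _ x _ y _
    exact absurd hmu (Nat.not_lt_zero _)
  | succ f ih =>
    intro front back s hmu hbx hcl
    cases front with
    | nil =>
      cases back with
      | nil =>
        rw [part2Fill]
        intro x hx y hstep
        rcases hcl x hx y hstep with h | h
        · exact h
        · simp at h
      | cons b bt =>
        rw [part2Fill]
        have hmu' : pvMu (pvCells mn mx) s (b :: bt).reverse [] < f := by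
          unfold pvMu at hmu ⊢
          simp only [List.length_reverse, List.length_nil, List.length_cons] at *
          omega
        refine ih _ _ _ hmu' (fun e he => hbx e ?_) (fun x hx y hstep => ?_)
        · simp only [List.append_nil, List.mem_reverse] at he
          simpa using he
        · rcases hcl x hx y hstep with h | h
          · exact Or.inl h
          · refine Or.inr ?_
            simp only [List.nil_append] at h
            rcases List.mem_cons.mp h with rfl | h
            · simp
            · simp [h]
    | cons node front =>
      rw [part2Fill]
      by_cases hc : s.contains node = true
      · simp only [hc, if_true]
        have hmu' : pvMu (pvCells mn mx) s front back < f := by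
          unfold pvMu at hmu ⊢
          simp only [List.length_cons] at hmu
          omega
        have hbx' : ∀ e ∈ front ++ back, pvInBox mn mx e = true := by
          intro e he
          rcases List.mem_append.mp he with h | h
          · exact hbx e (List.mem_append.mpr (Or.inl (List.mem_cons_of_mem _ h)))
          · exact hbx e (List.mem_append.mpr (Or.inr h))
        refine ih _ _ _ hmu' hbx' (fun x hx y hstep => ?_)
        rcases hcl x hx y hstep with h | h
        · exact Or.inl h
        · rcases List.mem_append.mp h with h | h
          · rcases List.mem_cons.mp h with rfl | h
            · exact Or.inl hc
            · exact Or.inr (List.mem_append.mpr (Or.inl h))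
          · exact Or.inr (List.mem_append.mpr (Or.inr h))
      · rw [Bool.not_eq_true] at hc
        simp only [hc, Bool.false_eq_true, if_false]
        rw [part2Fill_inner]
        set nbl := (pvDirs.map (pvAdd node)).filter
            (fun nb => pvInBox mn mx nb && !PySem.Set.contains points nb) with hnbl
        have hU : pvU (s.insert node) (pvCells mn mx) < pvU s (pvCells mn mx) :=
          pvU_insert_lt _ _ _ ((pv_mem_cells mn mx node).mpr (hbx node (by simp))) hc
        have hlen : nbl.length ≤ 6 :=
          le_trans (List.length_filter_le _ _) (by simp [pvDirs])
        have hmu' : pvMu (pvCells mn mx) (s.insert node) front (nbl.reverse ++ back) < f := by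
          unfold pvMu at hmu ⊢
          simp only [List.length_append, List.length_reverse, List.length_cons] at *
          omega
        have hbx' : ∀ e ∈ front ++ (nbl.reverse ++ back), pvInBox mn mx e = true := by
          intro e he
          rcases List.mem_append.mp he with h | h
          · exact hbx e (List.mem_append.mpr (Or.inl (List.mem_cons_of_mem _ h)))
          · rcases List.mem_append.mp h with h | h
            · rw [List.mem_reverse, hnbl, List.mem_filter] at h
              exact (Bool.and_eq_true_iff.mp h.2).1
            · exact hbx e (List.mem_append.mpr (Or.inr h))
        refine ih _ _ _ hmu' hbx' (fun x hx y hstep => ?_)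
        rw [Std.HashSet.contains_insert] at hx
        rcases Bool.or_eq_true_iff.mp hx with hxe | hxs
        · -- x is the freshly inserted node: its step-successors were all pushed
          obtain ⟨hby, hay, d, hd, rfl⟩ := hstep
          rw [← eq_of_beq hxe] at hby hay ⊢
          refine Or.inr (List.mem_append.mpr (Or.inr (List.mem_append.mpr (Or.inl ?_))))
          rw [List.mem_reverse, hnbl, List.mem_filter]
          exact ⟨List.mem_map.mpr ⟨d, hd, rfl⟩, by rw [hby, hay]; rfl⟩
        · rcases hcl x hxs y hstep with h | h
          · exact Or.inl (by simp [Std.HashSet.contains_insert, h])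
          · rcases List.mem_append.mp h with h | h
            · rcases List.mem_cons.mp h with rfl | h
              · exact Or.inl (by simp [Std.HashSet.contains_insert])
              · exact Or.inr (List.mem_append.mpr (Or.inl h))
            · exact Or.inr (List.mem_append.mpr (Or.inr (List.mem_append.mpr (Or.inr h))))

theorem fill_reach (points : PySem.Set (Int × Int × Int)) (mn mx : Int × Int × Int)
    (hlo_box : pvInBox mn mx mn = true) :
    ∀ x, (part2Fill points mn mx (pvFuel mn mx) [mn] [] ∅).contains x = true ↔
      pvReach points mn mx x := by
  have hmu : pvMu (pvCells mn mx) ∅ [mn] [] < pvFuel mn mx := by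
    unfold pvMu pvFuel pvU
    have hcc : (pvCells mn mx).countP (fun c => !(∅ : Std.HashSet (Int × Int × Int)).contains c) =
        (pvCells mn mx).length := List.countP_eq_length.mpr (fun a _ => by simp)
    rw [hcc]
    simp only [List.length_cons, List.length_nil]
    omega
  have hbx : ∀ c ∈ ([mn] ++ ([] : List (Int × Int × Int))), pvInBox mn mx c = true := by
    intro c hc
    simp only [List.append_nil, List.mem_singleton] at hc
    rw [hc]
    exact hlo_box
  intro x
  constructor
  · refine fill_sound points mn mx _ [mn] [] ∅ (fun y hy => by simp at hy)
      (fun c hc => ?_) x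
    simp only [List.append_nil, List.mem_singleton] at hc
    rw [hc]
    exact Relation.ReflTransGen.refl
  · intro hr
    have hlo_mem : (part2Fill points mn mx (pvFuel mn mx) [mn] [] ∅).contains mn = true :=
      fill_exhaust points mn mx _ [mn] [] ∅ hmu hbx mn (by simp)
    have hclosed := fill_closed points mn mx (pvFuel mn mx) [mn] [] ∅ hmu hbx
      (fun z hz => by simp at hz)
    induction hr with
    | refl => exact hlo_mem
    | tail h1 hstep ih2 => exact hclosed _ ih2 _ hstep

-- ===== B-side: the sweep computes exactly the reachable set =====

theorem pv_roundStep_eq (solid : PySem.Set (Int × Int × Int)) (lo : Int × Int × Int)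
    (st : Std.HashSet (Int × Int × Int) × Bool) (c : Int × Int × Int) :
    pvRoundStep solid lo st c = st ∨
      (st.1.contains c = false ∧ PySem.Set.contains solid c = false ∧
        pvMarkCond st.1 lo c = true ∧ pvRoundStep solid lo st c = (st.1.insert c, true)) := by
  unfold pvRoundStep
  split_ifs with h1 h2
  · exact Or.inl rfl
  · simp only [Bool.or_eq_true, not_or, Bool.not_eq_true] at h1
    exact Or.inr ⟨h1.1, h1.2, h2, rfl⟩
  · exact Or.inl rfl

theorem round_flag_mono (solid : PySem.Set (Int × Int × Int)) (lo : Int × Int × Int) :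
    ∀ (l : List (Int × Int × Int)) (st : Std.HashSet (Int × Int × Int) × Bool),
      st.2 = true → (l.foldl (pvRoundStep solid lo) st).2 = true := by
  intro l
  induction l with
  | nil => intro st h; exact h
  | cons c t ih =>
    intro st h
    rw [List.foldl_cons]
    refine ih _ ?_
    rcases pv_roundStep_eq solid lo st c with he | ⟨_, _, _, he⟩ <;> rw [he]
    exact h

theorem round_set_mono (solid : PySem.Set (Int × Int × Int)) (lo : Int × Int × Int) :
    ∀ (l : List (Int × Int × Int)) (st : Std.HashSet (Int × Int × Int) × Bool)
      (x : Int × Int × Int), st.1.contains x = true →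
      (l.foldl (pvRoundStep solid lo) st).1.contains x = true := by
  intro l
  induction l with
  | nil => intro st x h; exact h
  | cons c t ih =>
    intro st x h
    rw [List.foldl_cons]
    refine ih _ _ ?_
    rcases pv_roundStep_eq solid lo st c with he | ⟨_, _, _, he⟩ <;> rw [he]
    · exact h
    · simp [Std.HashSet.contains_insert, h]

theorem round_sound (solid : PySem.Set (Int × Int × Int)) (mn mx : Int × Int × Int) :
    ∀ (l : List (Int × Int × Int)) (st : Std.HashSet (Int × Int × Int) × Bool),
      (∀ c ∈ l, pvInBox mn mx c = true) →
      (∀ x, st.1.contains x = true → pvReach solid mn mx x) →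
      ∀ x, (l.foldl (pvRoundStep solid mn) st).1.contains x = true →
        pvReach solid mn mx x := by
  intro l
  induction l with
  | nil => intro st _ hs x hx; exact hs x hx
  | cons c t ih =>
    intro st hbx hs x hx
    rw [List.foldl_cons] at hx
    refine ih _ (fun e he => hbx e (List.mem_cons_of_mem _ he)) (fun y hy => ?_) x hx
    rcases pv_roundStep_eq solid mn st c with he | ⟨hnc, hair, hmk, he⟩
    · rw [he] at hy; exact hs y hy
    · rw [he] at hy
      simp only [Std.HashSet.contains_insert] at hy
      rcases Bool.or_eq_true_iff.mp hy with h | h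
      · rw [← eq_of_beq h]
        unfold pvMarkCond at hmk
        rcases Bool.or_eq_true_iff.mp hmk with h2 | h2
        · rw [eq_of_beq h2]; exact Relation.ReflTransGen.refl
        · obtain ⟨d, hd, hcd⟩ := List.any_eq_true.mp h2
          obtain ⟨d', hd', hdd'⟩ := pv_dirs_neg d hd
          refine Relation.ReflTransGen.tail (hs _ hcd)
            ⟨hbx c List.mem_cons_self, hair, d', hd', (hdd' c).symm⟩
      · exact hs y h

theorem round_nochange (solid : PySem.Set (Int × Int × Int)) (lo : Int × Int × Int) :
    ∀ (l : List (Int × Int × Int)) (st : Std.HashSet (Int × Int × Int) × Bool),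
      (l.foldl (pvRoundStep solid lo) st).2 = false →
      (l.foldl (pvRoundStep solid lo) st).1 = st.1 ∧
      ∀ c ∈ l, (st.1.contains c || PySem.Set.contains solid c) = true ∨
        pvMarkCond st.1 lo c = false := by
  intro l
  induction l with
  | nil => intro st _; exact ⟨rfl, by simp⟩
  | cons c t ih =>
    intro st hf
    rw [List.foldl_cons] at hf ⊢
    by_cases h1 : (st.1.contains c || PySem.Set.contains solid c) = true
    · have he : pvRoundStep solid lo st c = st := by
        unfold pvRoundStep
        rw [if_pos h1]
      rw [he] at hf ⊢
      obtain ⟨ha, hb⟩ := ih st hf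
      exact ⟨ha, fun e he' => by
        rcases List.mem_cons.mp he' with rfl | h
        · exact Or.inl h1
        · exact hb e h⟩
    · by_cases hm : pvMarkCond st.1 lo c = true
      · have he : pvRoundStep solid lo st c = (st.1.insert c, true) := by
          unfold pvRoundStep
          rw [if_neg h1, if_pos hm]
        rw [he] at hf
        rw [round_flag_mono solid lo t (st.1.insert c, true) rfl] at hf
        cases hf
      · have he : pvRoundStep solid lo st c = st := by
          unfold pvRoundStep
          rw [if_neg h1, if_neg hm]
        rw [he] at hf ⊢
        obtain ⟨ha, hb⟩ := ih st hf
        rw [Bool.not_eq_true] at hm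
        exact ⟨ha, fun e he' => by
          rcases List.mem_cons.mp he' with rfl | h
          · exact Or.inr hm
          · exact hb e h⟩

theorem round_U_lt (solid : PySem.Set (Int × Int × Int)) (lo : Int × Int × Int)
    (cells : List (Int × Int × Int)) :
    ∀ (l : List (Int × Int × Int)) (st : Std.HashSet (Int × Int × Int) × Bool),
      (∀ c ∈ l, c ∈ cells) → st.2 = false →
      (l.foldl (pvRoundStep solid lo) st).2 = true →
      pvU (l.foldl (pvRoundStep solid lo) st).1 cells < pvU st.1 cells := by
  intro l
  induction l with
  | nil =>
    intro st _ hst hf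
    rw [List.foldl_nil] at hf
    rw [hst] at hf
    cases hf
  | cons c t ih =>
    intro st hsub hst hf
    rw [List.foldl_cons] at hf ⊢
    by_cases h1 : (st.1.contains c || PySem.Set.contains solid c) = true
    · have he : pvRoundStep solid lo st c = st := by
        unfold pvRoundStep
        rw [if_pos h1]
      rw [he] at hf ⊢
      exact ih st (fun e he' => hsub e (List.mem_cons_of_mem _ he')) hst hf
    · by_cases hm : pvMarkCond st.1 lo c = true
      · have he : pvRoundStep solid lo st c = (st.1.insert c, true) := by
          unfold pvRoundStep
          rw [if_neg h1, if_pos hm]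
        rw [he]
        have hcc : st.1.contains c = false := by
          simp only [Bool.or_eq_true, not_or, Bool.not_eq_true] at h1
          exact h1.1
        have hlt : pvU (st.1.insert c) cells < pvU st.1 cells :=
          pvU_insert_lt cells st.1 c (hsub c List.mem_cons_self) hcc
        have hle : pvU (t.foldl (pvRoundStep solid lo) (st.1.insert c, true)).1 cells ≤
            pvU (st.1.insert c) cells :=
          pvU_mono cells _ _ (round_set_mono solid lo t (st.1.insert c, true))
        omega
      · have he : pvRoundStep solid lo st c = st := by
          unfold pvRoundStep
          rw [if_neg h1, if_neg hm]
        rw [he] at hf ⊢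
        exact ih st (fun e he' => hsub e (List.mem_cons_of_mem _ he')) hst hf

theorem sweep_sound (solid : PySem.Set (Int × Int × Int)) (mn mx : Int × Int × Int) :
    ∀ (g : Nat) (m : Std.HashSet (Int × Int × Int)),
      (∀ x, m.contains x = true → pvReach solid mn mx x) →
      ∀ x, (pvSweep solid mn (pvCells mn mx) g m).contains x = true →
        pvReach solid mn mx x := by
  intro g
  induction g with
  | zero => intro m hm x hx; rw [pvSweep] at hx; exact hm x hx
  | succ g ih =>
    intro m hm x hx
    rw [pvSweep] at hx
    have hsound : ∀ y, (pvRound solid mn (pvCells mn mx) m).1.contains y = true →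
        pvReach solid mn mx y :=
      round_sound solid mn mx (pvCells mn mx) (m, false)
        (fun c hc => (pv_mem_cells mn mx c).mp hc) hm
    by_cases hflag : (pvRound solid mn (pvCells mn mx) m).2 = true
    · simp only [hflag, if_true] at hx
      exact ih _ hsound x hx
    · rw [Bool.not_eq_true] at hflag
      simp only [hflag, Bool.false_eq_true, if_false] at hx
      exact hsound x hx

theorem sweep_fix (solid : PySem.Set (Int × Int × Int)) (mn mx : Int × Int × Int) :
    ∀ (g : Nat) (m : Std.HashSet (Int × Int × Int)),
      pvU m (pvCells mn mx) < g →
      ∀ c ∈ pvCells mn mx,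
        ((pvSweep solid mn (pvCells mn mx) g m).contains c ||
          PySem.Set.contains solid c) = true ∨
        pvMarkCond (pvSweep solid mn (pvCells mn mx) g m) mn c = false := by
  intro g
  induction g with
  | zero => intro m hU; exact absurd hU (Nat.not_lt_zero _)
  | succ g ih =>
    intro m hU
    rw [pvSweep]
    by_cases hflag : (pvRound solid mn (pvCells mn mx) m).2 = true
    · simp only [hflag, if_true]
      refine ih _ ?_
      have hlt : pvU (pvRound solid mn (pvCells mn mx) m).1 (pvCells mn mx) <
          pvU m (pvCells mn mx) :=
        round_U_lt solid mn (pvCells mn mx) (pvCells mn mx) (m, false)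
          (fun e he => he) rfl hflag
      omega
    · rw [Bool.not_eq_true] at hflag
      simp only [hflag, Bool.false_eq_true, if_false]
      obtain ⟨heq, hper⟩ := round_nochange solid mn (pvCells mn mx) (m, false) hflag
      intro c hc
      have heq' : (pvRound solid mn (pvCells mn mx) m).1 = m := heq
      rw [heq']
      exact hper c hc

theorem sweep_reach (points : PySem.Set (Int × Int × Int)) (mn mx : Int × Int × Int)
    (hlo_box : pvInBox mn mx mn = true)
    (hlo_air : PySem.Set.contains points mn = false) :
    ∀ x, (pvSweep points mn (pvCells mn mx) ((pvCells mn mx).length + 1) ∅).contains x = true ↔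
      pvReach points mn mx x := by
  have hU : pvU (∅ : Std.HashSet (Int × Int × Int)) (pvCells mn mx) < (pvCells mn mx).length + 1 := by
    unfold pvU
    have hcc : (pvCells mn mx).countP (fun c => !(∅ : Std.HashSet (Int × Int × Int)).contains c) =
        (pvCells mn mx).length := List.countP_eq_length.mpr (fun a _ => by simp)
    omega
  have hfix := sweep_fix points mn mx ((pvCells mn mx).length + 1) ∅ hU
  have hlo_mem : (pvSweep points mn (pvCells mn mx) ((pvCells mn mx).length + 1) ∅).contains mn
      = true := by
    rcases hfix mn ((pv_mem_cells mn mx mn).mpr hlo_box) with h | h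
    · rw [hlo_air, Bool.or_false] at h
      exact h
    · rw [pvMarkCond] at h
      simp at h
  have hclosed : ∀ x, (pvSweep points mn (pvCells mn mx) ((pvCells mn mx).length + 1) ∅).contains x
      = true → ∀ y, pvStep points mn mx x y →
      (pvSweep points mn (pvCells mn mx) ((pvCells mn mx).length + 1) ∅).contains y = true := by
    intro x hx y hstep
    obtain ⟨hby, hay, d, hd, rfl⟩ := hstep
    rcases hfix (pvAdd x d) ((pv_mem_cells mn mx _).mpr hby) with h | h
    · rw [hay, Bool.or_false] at h
      exact h
    · exfalso
      obtain ⟨d', hd', hdd'⟩ := pv_dirs_neg d hd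
      rw [pvMarkCond] at h
      have hany : pvDirs.any (fun e =>
          (pvSweep points mn (pvCells mn mx) ((pvCells mn mx).length + 1) ∅).contains
            (pvAdd (pvAdd x d) e)) = true :=
        List.any_eq_true.mpr ⟨d', hd', by rw [hdd' x]; exact hx⟩
      rw [hany, Bool.or_true] at h
      cases h
  intro x
  constructor
  · exact sweep_sound points mn mx _ ∅ (fun y hy => by simp at hy) x
  · intro hr
    induction hr with
    | refl => exact hlo_mem
    | tail h1 hstep ih2 => exact hclosed _ ih2 _ hstep

-- ===== putting it together =====

theorem part2_main (input_arr : List (Int × Int × Int)) (h : input_arr ≠ []) :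
    part2 input_arr = part2_alt input_arr := by
  simp only [part2, part2_alt]
  rw [pv_bound_min input_arr h (fun p => p.1), pv_bound_min input_arr h (fun p => p.2.1),
    pv_bound_min input_arr h (fun p => p.2.2), pv_bound_max input_arr h (fun p => p.1),
    pv_bound_max input_arr h (fun p => p.2.1), pv_bound_max input_arr h (fun p => p.2.2)]
  set m1 := (PySem.List.min? (input_arr.map (fun p => p.1)) (fun x => x)).getD 0 with hm1
  set m2 := (PySem.List.min? (input_arr.map (fun p => p.2.1)) (fun x => x)).getD 0 with hm2
  set m3 := (PySem.List.min? (input_arr.map (fun p => p.2.2)) (fun x => x)).getD 0 with hm3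
  set M1 := (PySem.List.max? (input_arr.map (fun p => p.1)) (fun x => x)).getD 0 with hM1
  set M2 := (PySem.List.max? (input_arr.map (fun p => p.2.1)) (fun x => x)).getD 0 with hM2
  set M3 := (PySem.List.max? (input_arr.map (fun p => p.2.2)) (fun x => x)).getD 0 with hM3
  set mn : Int × Int × Int := (m1 - 1, m2 - 1, m3 - 1) with hmn
  set mx : Int × Int × Int := (M1 + 1, M2 + 1, M3 + 1) with hmx
  set P : PySem.Set (Int × Int × Int) := PySem.Set.ofList input_arr with hPdef
  have hP : P.Nodup := PySem.Set.nodup_ofList input_arr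
  obtain ⟨p0, hp0⟩ := List.exists_mem_of_ne_nil input_arr h
  have hbig : ∀ p ∈ input_arr,
      m1 ≤ p.1 ∧ p.1 ≤ M1 ∧ m2 ≤ p.2.1 ∧ p.2.1 ≤ M2 ∧ m3 ≤ p.2.2 ∧ p.2.2 ≤ M3 := by
    intro p hpl
    cases hq1 : PySem.List.min? (input_arr.map (fun p => p.1)) (fun x => x) with
    | none => exact absurd (by simpa using (PySem.List.min?_eq_none_iff _ _).mp hq1) h
    | some v1 =>
    cases hq2 : PySem.List.min? (input_arr.map (fun p => p.2.1)) (fun x => x) with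
    | none => exact absurd (by simpa using (PySem.List.min?_eq_none_iff _ _).mp hq2) h
    | some v2 =>
    cases hq3 : PySem.List.min? (input_arr.map (fun p => p.2.2)) (fun x => x) with
    | none => exact absurd (by simpa using (PySem.List.min?_eq_none_iff _ _).mp hq3) h
    | some v3 =>
    cases hQ1 : PySem.List.max? (input_arr.map (fun p => p.1)) (fun x => x) with
    | none => exact absurd (by simpa using (PySem.List.max?_eq_none_iff _ _).mp hQ1) h
    | some w1 =>
    cases hQ2 : PySem.List.max? (input_arr.map (fun p => p.2.1)) (fun x => x) with
    | none => exact absurd (by simpa using (PySem.List.max?_eq_none_iff _ _).mp hQ2) h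
    | some w2 =>
    cases hQ3 : PySem.List.max? (input_arr.map (fun p => p.2.2)) (fun x => x) with
    | none => exact absurd (by simpa using (PySem.List.max?_eq_none_iff _ _).mp hQ3) h
    | some w3 =>
    have l1 := PySem.List.min?_isMin hq1 p.1 (List.mem_map_of_mem hpl)
    have l2 := PySem.List.min?_isMin hq2 p.2.1 (List.mem_map_of_mem hpl)
    have l3 := PySem.List.min?_isMin hq3 p.2.2 (List.mem_map_of_mem hpl)
    have u1 := PySem.List.max?_isMax hQ1 p.1 (List.mem_map_of_mem hpl)
    have u2 := PySem.List.max?_isMax hQ2 p.2.1 (List.mem_map_of_mem hpl)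
    have u3 := PySem.List.max?_isMax hQ3 p.2.2 (List.mem_map_of_mem hpl)
    simp only [hm1, hm2, hm3, hM1, hM2, hM3, hq1, hq2, hq3, hQ1, hQ2, hQ3,
      Option.getD_some] at *
    exact ⟨l1, u1, l2, u2, l3, u3⟩
  have hbox : ∀ p ∈ P, pvInBox mn mx p = true := by
    intro p hpP
    obtain ⟨h1, h2, h3, h4, h5, h6⟩ := hbig p ((PySem.Set.mem_ofList _ _).mp hpP)
    simp only [hmn, hmx, pvInBox, Bool.and_eq_true, decide_eq_true_eq]
    exact ⟨⟨⟨by omega, by omega⟩, by omega, by omega⟩, by omega, by omega⟩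
  have hlo_box : pvInBox mn mx mn = true := by
    obtain ⟨h1, h2, h3, h4, h5, h6⟩ := hbig p0 hp0
    simp only [hmn, hmx, pvInBox, Bool.and_eq_true, decide_eq_true_eq]
    exact ⟨⟨⟨by omega, by omega⟩, by omega, by omega⟩, by omega, by omega⟩
  have hlo_air : PySem.Set.contains P mn = false := by
    rw [← Bool.not_eq_true, PySem.Set.contains_iff]
    intro hmem
    obtain ⟨h1, _⟩ := hbig mn ((PySem.Set.mem_ofList _ _).mp hmem)
    rw [hmn] at h1
    simp only at h1
    omega
  rw [part2_lockstep P mn mx hP hbox (pvFuel mn mx) [mn] [] ∅ 0, pvCnt_empty]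
  have hceq : ∀ x, (part2Fill P mn mx (pvFuel mn mx) [mn] [] ∅).contains x =
      (pvSweep P mn (pvCells mn mx) ((pvCells mn mx).length + 1) ∅).contains x := by
    intro x
    have h1 := fill_reach P mn mx hlo_box x
    have h2 := sweep_reach P mn mx hlo_box hlo_air x
    cases hb : (pvSweep P mn (pvCells mn mx) ((pvCells mn mx).length + 1) ∅).contains x with
    | true => exact h1.mpr (h2.mp hb)
    | false =>
      cases hf : (part2Fill P mn mx (pvFuel mn mx) [mn] [] ∅).contains x with
      | false => rfl
      | true =>
        rw [h2.mpr (h1.mp hf)] at hb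
        cases hb
  rw [pvCnt_congr P _ _ hceq]
  show 0 + ((pvCnt P (pvSweep P mn (pvCells mn mx) ((pvCells mn mx).length + 1) ∅) : Nat) : Int)
      - ((0 : Nat) : Int) =
    ((pvCnt P (pvSweep P mn (pvCells mn mx) ((pvCells mn mx).length + 1) ∅) : Nat) : Int)
  push_cast
  ring

-- ===== VERDICT (by name: the statement is the Claim_ definition above) =====
theorem part2_spec : Claim_equal_part2 := by
  intro input_arr _ hpre
  unfold Spec_part2
  exact part2_main input_arr hpre
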